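-- pv_equiv track=rewrite | github.com/eous/bestofn | common/ast_syntax_checker.py | _check_string_balance
-- ===== SOURCE A (Python) =====
-- from typing import Dict, Any, List, Optional
--
-- def _check_string_balance(code: str) -> List[str]:
--     """Check for unclosed string literals."""
--     errors = []
--
--     # Count unescaped quotes outside of other strings
--     for quote in ['"', "'"]:
--         # Very basic: count quotes and check if even
--         # This is imperfect but catches obvious issues
--         count = 0
--         i = 0
--         while i < len(code):
--             if code[i] == '\\' and i + 1 < len(code):
--                 i += 2  # Skip escaped char
--                 continue
--             if code[i] == quote:
--                 count += 1
--             i += 1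
--
--         if count % 2 != 0:
--             errors.append(f"Unclosed string ({quote})")
--
--     return errors
-- ===== SOURCE B (Python) =====
-- from typing import List
--
-- def _check_string_balance(code: str) -> List[str]:
--     """Check for unclosed string literals."""
--     dq_odd = sq_odd = False  # parity of unescaped quotes seen so far
--     chars = iter(code)
--     for ch in chars:
--         if ch == '\\':
--             next(chars, None)  # skip the escaped character
--         elif ch == '"':
--             dq_odd = not dq_odd
--         elif ch == "'":
--             sq_odd = not sq_odd
--     errors = []
--     if dq_odd:
--         errors.append('Unclosed string (")')
--     if sq_odd:
--         errors.append("Unclosed string (')")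
--     return errors
-- ===== Notes on version B (the rewrite author's own statement) =====
-- stated objective: simpler
-- what changed: Replaces A's two separate per-quote counting passes (each a manual index-walking escape-skip while-loop) with one single pass over the string that toggles two parity flags, then emits the messages from the flags.
import Mathlib
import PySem

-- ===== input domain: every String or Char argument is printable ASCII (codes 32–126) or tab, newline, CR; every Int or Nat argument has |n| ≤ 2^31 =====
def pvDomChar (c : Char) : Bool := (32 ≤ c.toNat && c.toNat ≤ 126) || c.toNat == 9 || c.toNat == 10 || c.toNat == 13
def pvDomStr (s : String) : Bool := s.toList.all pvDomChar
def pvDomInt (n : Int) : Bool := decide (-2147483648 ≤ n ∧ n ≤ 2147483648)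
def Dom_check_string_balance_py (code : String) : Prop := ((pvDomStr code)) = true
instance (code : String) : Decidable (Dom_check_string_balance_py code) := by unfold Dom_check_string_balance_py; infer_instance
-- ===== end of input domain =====

-- B replaces A's two per-quote counting passes with one single pass toggling two parity flags (objective: simpler).

-- ===== PORT A =====
-- A's while-loop over index i with the 'skip two on backslash-with-successor' rule,
-- transcribed as structural recursion over the remaining characters (same state: running count).
def pvLoopA (quote : Char) : List Char → Nat
  | [] => 0
  | '\\' :: _ :: rest => pvLoopA quote rest   -- code[i]=='\\' and i+1<len: i += 2, continue
  | a :: rest => (if a = quote then 1 else 0) + pvLoopA quote rest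

def check_string_balance_py (code : String) : List String :=
  ['"', '\''].foldl
    (fun errors quote =>
      let count := pvLoopA quote code.toList
      if count % 2 ≠ 0 then errors ++ ["Unclosed string (" ++ String.ofList [quote] ++ ")"] else errors)
    []

-- ===== PORT B =====
-- One pass over the characters; on '\\' the next character is consumed (next(chars, None));
-- '"' and '\'' each toggle their own parity flag.
def pvScanB : List Char → Bool → Bool → Bool × Bool
  | [], dq, sq => (dq, sq)
  | ['\\'], dq, sq => (dq, sq)
  | '\\' :: _ :: rest, dq, sq => pvScanB rest dq sq
  | '"' :: rest, dq, sq => pvScanB rest (!dq) sq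
  | '\'' :: rest, dq, sq => pvScanB rest dq (!sq)
  | _ :: rest, dq, sq => pvScanB rest dq sq

def check_string_balance_py_alt (code : String) : List String :=
  let (dq_odd, sq_odd) := pvScanB code.toList false false
  (if dq_odd then ["Unclosed string (\")"] else []) ++
  (if sq_odd then ["Unclosed string (')"] else [])

-- ===== PRECONDITION & SPEC =====
def Spec_check_string_balance_py (code : String) (out : List String) : Prop := out = check_string_balance_py_alt code
instance (code : String) (out : List String) : Decidable (Spec_check_string_balance_py code out) := by unfold Spec_check_string_balance_py; infer_instance

-- ===== CLAIM (what is proved, stated in full; the proofs are below) =====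
def Claim_equal_check_string_balance_py : Prop := ∀ (code : String), Dom_check_string_balance_py code → Spec_check_string_balance_py code (check_string_balance_py code)

-- ===== LEMMAS AND PROOFS =====
theorem pvScanB_eq (l : List Char) (dq sq : Bool) :
    pvScanB l dq sq = (xor dq (decide (pvLoopA '"' l % 2 = 1)),
                       xor sq (decide (pvLoopA '\'' l % 2 = 1))) := by
  induction l, dq, sq using pvScanB.induct with
  | case1 => simp [pvScanB, pvLoopA]
  | case2 => simp [pvScanB, pvLoopA]
  | case3 b rest dq sq ih =>
    simpa [pvScanB, pvLoopA] using ih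
  | case4 rest dq sq ih =>
    have h : ∀ n : Nat, (1 + n) % 2 = 1 ↔ ¬ n % 2 = 1 := by intro n; omega
    simp [pvScanB, pvLoopA, ih, h]
    cases dq <;> by_cases hp : pvLoopA '"' rest % 2 = 1 <;> simp [hp] <;> omega
  | case5 rest dq sq ih =>
    have h : ∀ n : Nat, (1 + n) % 2 = 1 ↔ ¬ n % 2 = 1 := by intro n; omega
    simp [pvScanB, pvLoopA, ih, h]
    cases sq <;> by_cases hp : pvLoopA '\'' rest % 2 = 1 <;> simp [hp] <;> omega
  | case6 a rest dq sq h1 h2 h3 h4 ih =>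
    have h3' : a ≠ '"' := h3
    have h4' : a ≠ '\'' := h4
    simp [pvScanB, pvLoopA, ih, h3', h4']

-- ===== VERDICT (by name: the statement is the Claim_ definition above) =====
theorem check_string_balance_py_spec : Claim_equal_check_string_balance_py := by
  intro code _
  unfold Spec_check_string_balance_py check_string_balance_py check_string_balance_py_alt
  simp [pvScanB_eq, List.foldl]
  by_cases h1 : pvLoopA '"' code.toList % 2 = 1 <;>
    by_cases h2 : pvLoopA '\'' code.toList % 2 = 1 <;>
      simp_all <;> omega
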